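-- pv_equiv track=rewrite | github.com/Moana63/Algogo | test_algo_tri_minimap.py | minimap
-- ===== SOURCE A (Python) =====
-- def minimap(seq, len_window=5, kmer=6):
--     list_kmer_window = [0 for _ in range(len_window)]
--     minimiser_list = list()
--     for i in range(len(seq)-kmer-1):
--         for j in range(len_window):
--             list_kmer_window[j] = (seq[i+j: i+j+kmer], i)
--         min = sorted(list_kmer_window)[0]
--         if min[0] not in minimiser_list:
--             minimiser_list.append(min)
--     return minimiser_list
-- ===== SOURCE B (Python) =====
-- def minimap(seq, len_window=5, kmer=6):
--     # Sliding-window minimum with a monotonic queue: one kmer slice per position,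
--     # no per-window sort (A sorts a rebuilt window list for every position).
--     n = len(seq) - kmer - 1
--     out = []
--     if n <= 0 or len_window <= 0:
--         return out
--     q = []      # monotonic queue of (kmer_string, start): strings strictly increasing
--     head = 0    # index of the queue front (front removal = advancing head)
--     for p in range(n + len_window - 1):
--         s = seq[p:p + kmer]
--         while len(q) > head and q[-1][0] >= s:
--             q.pop()
--         q.append((s, p))
--         i = p - len_window + 1
--         if i >= 0:
--             while q[head][1] < i:
--                 head += 1
--             out.append((q[head][0], i))
--     return out
-- ===== Notes on version B (the rewrite author's own statement) =====
-- stated objective: faster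
-- what changed: Replaced the per-position rebuild-window/sort/take-first plus always-true linear membership scan with a single pass maintaining a monotonic queue (sliding-window minimum): one kmer slice per position, amortized O(1) queue work, direct append to the output.
import Mathlib
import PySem

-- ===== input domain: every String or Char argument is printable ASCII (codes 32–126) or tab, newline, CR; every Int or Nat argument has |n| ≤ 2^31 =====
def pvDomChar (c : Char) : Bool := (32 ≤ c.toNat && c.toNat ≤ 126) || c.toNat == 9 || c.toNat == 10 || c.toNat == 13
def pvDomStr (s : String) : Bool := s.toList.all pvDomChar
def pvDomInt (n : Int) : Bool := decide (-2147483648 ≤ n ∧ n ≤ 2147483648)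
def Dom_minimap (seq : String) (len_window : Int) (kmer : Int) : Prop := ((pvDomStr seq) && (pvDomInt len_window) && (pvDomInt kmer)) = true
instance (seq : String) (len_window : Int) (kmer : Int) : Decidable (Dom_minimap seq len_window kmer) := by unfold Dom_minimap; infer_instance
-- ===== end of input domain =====

-- B replaces A's per-position rebuild/sort/scan with a one-pass monotonic-queue sliding-window
-- minimum (asymptotically faster: A rescans its growing result list every step).


-- ===== PORT A =====
def minimap (seq : String) (len_window : Int) (kmer : Int) : List (String × Int) :=
  -- list_kmer_window = [0 for _ in range(len_window)]: Python fills it with the int 0, but every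
  -- cell is overwritten with a (str, int) pair before any use, so cells are typed as pairs here.
  let list_kmer_window0 : List (String × Int) :=
    (PySem.List.pyRange 0 len_window 1).map (fun _ => ("", 0))
  (PySem.List.pyRange 0 (PySem.Str.len seq - kmer - 1) 1).foldl
    (fun minimiser_list i =>
      let lkw := (PySem.List.pyRange 0 len_window 1).foldl
        (fun lkw j =>
          PySem.List.pySetD lkw j (PySem.Str.slice seq (some (i + j)) (some (i + j + kmer)), i))
        list_kmer_window0
      -- sorted(list_kmer_window)[0]: Python sorts the tuples lexicographically
      let m := PySem.List.pyGetD (PySem.List.sorted2 lkw Prod.fst Prod.snd) 0 ("", 0)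
      -- `min[0] not in minimiser_list`: a str is compared with (str, int) tuples — always False
      if minimiser_list.any (fun _ => false) then minimiser_list
      else minimiser_list ++ [m])
    []

-- ===== PORT B =====
-- `while len(q) > head and q[-1][0] >= s: q.pop()`
def pvPopBack (q : List (String × Int)) (head : Nat) (s : String) : List (String × Int) :=
  if head < q.length then
    match q.getLast? with
    | some last => if s ≤ last.1 then pvPopBack q.dropLast head s else q
    | none => q
  else q
termination_by q.length
decreasing_by simp_all [List.length_dropLast]; omega

-- `while q[head][1] < i: head += 1` (the in-range test only makes the loop total: B's queue
-- is never exhausted here because the element pushed at the current position never leaves)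
def pvAdvanceHead (q : List (String × Int)) (head : Nat) (i : Int) : Nat :=
  if h : head < q.length then
    if q[head].2 < i then pvAdvanceHead q (head + 1) i else head
  else head
termination_by q.length - head

def minimap_alt (seq : String) (len_window : Int) (kmer : Int) : List (String × Int) :=
  let n : Int := PySem.Str.len seq - kmer - 1
  if n ≤ 0 ∨ len_window ≤ 0 then []
  else
    ((PySem.List.pyRange 0 (n + len_window - 1) 1).foldl
      (fun (st : List (String × Int) × Nat × List (String × Int)) p =>
        let s := PySem.Str.slice seq (some p) (some (p + kmer))
        let q := pvPopBack st.1 st.2.1 s ++ [(s, p)]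
        let i := p - len_window + 1
        if 0 ≤ i then
          let head := pvAdvanceHead q st.2.1 i
          (q, head, st.2.2 ++ [((PySem.List.pyGetD q (head : Int) ("", 0)).1, i)])
        else (q, st.2.1, st.2.2))
      ([], 0, [])).2.2

-- ===== PRECONDITION & SPEC =====
-- Pre_ excludes only the inputs on which A raises: len_window ≤ 0 while the outer loop runs
-- (sorted([])[0] is an IndexError).
def Pre_minimap (seq : String) (len_window : Int) (kmer : Int) : Prop :=
  0 < len_window ∨ PySem.Str.len seq - kmer - 1 ≤ 0
instance (seq : String) (len_window : Int) (kmer : Int) : Decidable (Pre_minimap seq len_window kmer) := by unfold Pre_minimap; infer_instance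

def pvWitness_minimap : String × Int × Int := ("abcdabcda", 3, 2)

def Spec_minimap (seq : String) (len_window : Int) (kmer : Int) (out : List (String × Int)) : Prop := out = minimap_alt seq len_window kmer
instance (seq : String) (len_window : Int) (kmer : Int) (out : List (String × Int)) : Decidable (Spec_minimap seq len_window kmer out) := by unfold Spec_minimap; infer_instance

-- ===== CLAIM (what is proved, stated in full; the proofs are below) =====
def Claim_equal_minimap : Prop := ∀ (seq : String) (len_window : Int) (kmer : Int), Dom_minimap seq len_window kmer → Pre_minimap seq len_window kmer → Spec_minimap seq len_window kmer (minimap seq len_window kmer)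

-- ===== LEMMAS AND PROOFS =====

-- Throughout, `f p` abstracts the kmer slice seq[p:p+kmer]; the equivalence never needs to
-- unfold it.  `pvCanon f l r` is the monotonic queue's contents after positions [l, r) have
-- been processed and fronts below l evicted: the positions x whose kmer is strictly smaller
-- than every later kmer in the range.

def pvEmb (f : Int → String) (x : Int) : String × Int := (f x, x)

def pvGood (f : Int → String) (r x : Int) : Bool :=
  (PySem.List.pyRange (x + 1) r 1).all (fun y => decide (f x < f y))

def pvCanon (f : Int → String) (l r : Int) : List Int :=
  (PySem.List.pyRange l r 1).filter (pvGood f r)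

-- the minimal kmer of the window [l, r) (what both programs emit)
def pvHead (f : Int → String) (l r : Int) : String :=
  match pvCanon f l r with
  | [] => ""
  | x :: _ => f x

lemma pvGood_iff (f : Int → String) (r x : Int) :
    pvGood f r x = true ↔ ∀ y : Int, x < y → y < r → f x < f y := by
  unfold pvGood
  simp only [List.all_eq_true, PySem.List.mem_pyRange_one, decide_eq_true_eq]
  constructor
  · intro h y h1 h2; exact h y ⟨by omega, h2⟩
  · intro h y ⟨h1, h2⟩; exact h y (by omega) h2

lemma mem_pvCanon (f : Int → String) (l r x : Int) :
    x ∈ pvCanon f l r ↔ l ≤ x ∧ x < r ∧ ∀ y : Int, x < y → y < r → f x < f y := by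
  unfold pvCanon
  simp [List.mem_filter, PySem.List.mem_pyRange_one, pvGood_iff, and_assoc]

lemma pvCanon_pairwise_lt (f : Int → String) (l r : Int) :
    (pvCanon f l r).Pairwise (· < ·) :=
  (PySem.List.pairwise_lt_pyRange_one l r).filter _

lemma pvCanon_pairwise_str (f : Int → String) (l r : Int) :
    (pvCanon f l r).Pairwise (fun a b => f a < f b) := by
  refine (pvCanon_pairwise_lt f l r).imp_of_mem ?_
  intro a b ha hb hab
  exact ((mem_pvCanon f l r a).mp ha).2.2 b hab ((mem_pvCanon f l r b).mp hb).2.1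

lemma pvCanon_succ (f : Int → String) (l r : Int) (h : l ≤ r) :
    pvCanon f l (r + 1) = (pvCanon f l r).filter (fun x => decide (f x < f r)) ++ [r] := by
  unfold pvCanon
  rw [PySem.List.pyRange_one_succ_right h, List.filter_append, List.filter_filter]
  congr 1
  · apply List.filter_congr
    intro x hx
    have hxr : x < r := (PySem.List.mem_pyRange_one.mp hx).2
    rw [Bool.eq_iff_iff]
    simp only [Bool.and_eq_true, decide_eq_true_eq, pvGood_iff]
    constructor
    · intro h1
      exact ⟨h1 r hxr (by omega), fun y hy1 hy2 => h1 y hy1 (by omega)⟩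
    · rintro ⟨h1, h2⟩ y hy1 hy2
      by_cases hyr : y < r
      · exact h2 y hy1 hyr
      · have : y = r := by omega
        subst this; exact h1
  · have : pvGood f (r + 1) r = true := by
      refine (pvGood_iff f (r + 1) r).mpr ?_
      intro y hy1 hy2; omega
    simp [this]

lemma pvCanon_restrict (f : Int → String) (l l' r : Int) (h : l ≤ l') :
    pvCanon f l' r = (pvCanon f l r).filter (fun x => decide (l' ≤ x)) := by
  unfold pvCanon
  rw [List.filter_filter]
  by_cases hlr : l' ≤ r
  · rw [PySem.List.pyRange_one_append l l' r h hlr, List.filter_append]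
    have h1 : (PySem.List.pyRange l l' 1).filter
        (fun a => decide (l' ≤ a) && pvGood f r a) = [] := by
      apply List.filter_eq_nil_iff.mpr
      intro x hx
      have hxl := (PySem.List.mem_pyRange_one.mp hx).2
      simp only [Bool.and_eq_true, decide_eq_true_eq]
      rintro ⟨h3, -⟩; omega
    rw [h1, List.nil_append]
    apply (List.filter_congr ?_).symm
    intro x hx
    have hxl := (PySem.List.mem_pyRange_one.mp hx).1
    simp [hxl]
  · rw [PySem.List.pyRange_one_eq_nil (by omega), List.filter_nil]
    symm
    apply List.filter_eq_nil_iff.mpr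
    intro x hx
    have hxr := (PySem.List.mem_pyRange_one.mp hx).2
    simp only [Bool.and_eq_true, decide_eq_true_eq]
    rintro ⟨h3, -⟩; omega

lemma pvSplit (i : Int) :
    ∀ c : List Int, c.Pairwise (· < ·) →
      c = c.filter (fun x => decide (x < i)) ++ c.filter (fun x => decide (i ≤ x)) := by
  intro c
  induction c with
  | nil => simp
  | cons x t ih =>
      intro hpw
      rcases List.pairwise_cons.mp hpw with ⟨hx, ht⟩
      by_cases hxi : x < i
      · simp only [List.filter_cons, decide_eq_true_eq]
        rw [if_pos hxi, if_neg (by omega : ¬ i ≤ x), List.cons_append]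
        exact congrArg (x :: ·) (ih ht)
      · simp only [List.filter_cons, decide_eq_true_eq]
        rw [if_neg hxi, if_pos (by omega : i ≤ x)]
        have h1 : t.filter (fun y => decide (y < i)) = [] :=
          List.filter_eq_nil_iff.mpr (fun y hy => by
            have := hx y hy
            simp only [decide_eq_true_eq]
            omega)
        have h2 : t.filter (fun y => decide (i ≤ y)) = t :=
          List.filter_eq_self.mpr (fun y hy => by
            have := hx y hy
            simp only [decide_eq_true_eq]
            omega)
        rw [h1, h2, List.nil_append]

-- the pop-back loop removes exactly the queue suffix whose kmers are ≥ s
lemma pvPopBack_eq (f : Int → String) (s : String) :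
    ∀ (c : List Int) (dead : List (String × Int)),
      c.Pairwise (fun a b => f a < f b) →
      pvPopBack (dead ++ c.map (pvEmb f)) dead.length s
        = dead ++ (c.filter (fun x => decide (f x < s))).map (pvEmb f) := by
  intro c
  induction c using List.reverseRecOn with
  | nil => intro dead _; rw [pvPopBack]; simp
  | append_singleton c' x ih =>
      intro dead hpw
      have hpw' : c'.Pairwise (fun a b => f a < f b) := (List.pairwise_append.mp hpw).1
      have hlastlt : ∀ y ∈ c', f y < f x := by
        intro y hy
        exact (List.pairwise_append.mp hpw).2.2 y hy x (List.mem_cons_self)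
      rw [pvPopBack]
      have hlen : dead.length < (dead ++ (c' ++ [x]).map (pvEmb f)).length := by simp
      rw [if_pos hlen]
      have hlast : (dead ++ (c' ++ [x]).map (pvEmb f)).getLast? = some (pvEmb f x) := by
        simp
      simp only [hlast]
      by_cases hc : s ≤ (pvEmb f x).1
      · rw [if_pos hc]
        have hnotlt : ¬ f x < s := by
          simp only [pvEmb] at hc
          exact not_lt.mpr hc
        have hdrop : (dead ++ (c' ++ [x]).map (pvEmb f)).dropLast = dead ++ c'.map (pvEmb f) := by
          rw [List.map_append, ← List.append_assoc, List.map_cons, List.map_nil,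
            List.dropLast_concat]
        rw [hdrop, ih dead hpw', List.filter_append,
          List.filter_cons_of_neg (by simp only [decide_eq_true_eq]; exact hnotlt)]
        simp
      · rw [if_neg hc]
        have hlts : f x < s := by
          simp only [pvEmb] at hc
          exact not_le.mp hc
        have hfe : (c' ++ [x]).filter (fun y => decide (f y < s)) = c' ++ [x] := by
          apply List.filter_eq_self.mpr
          intro y hy
          rcases List.mem_append.mp hy with hy' | hy'
          · simp only [decide_eq_true_eq]
            exact lt_trans (hlastlt y hy') hlts
          · rw [List.mem_singleton.mp hy']
            simp only [decide_eq_true_eq]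
            exact hlts
        rw [hfe]

lemma pvAdvanceHead_eq :
    ∀ (a dead b : List (String × Int)) (i : Int),
      (∀ e ∈ a, e.2 < i) → (∀ e ∈ b, ¬ e.2 < i) → b ≠ [] →
      pvAdvanceHead (dead ++ a ++ b) dead.length i = dead.length + a.length := by
  intro a
  induction a with
  | nil =>
      intro dead b i _ hb hbne
      obtain ⟨y, b', rfl⟩ := List.exists_cons_of_ne_nil hbne
      rw [pvAdvanceHead]
      have hlt : dead.length < (dead ++ [] ++ y :: b').length := by simp
      rw [dif_pos hlt]
      have hnb : ¬ y.2 < i := hb y List.mem_cons_self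
      simp [hnb]
  | cons e a' ih =>
      intro dead b i ha hb hbne
      rw [pvAdvanceHead]
      have hlt : dead.length < (dead ++ (e :: a') ++ b).length := by simp
      rw [dif_pos hlt]
      have he : (dead ++ (e :: a') ++ b)[dead.length]'hlt = e := by
        rw [List.getElem_append_left (by simp)]
        rw [List.getElem_append_right (by simp)]
        simp
      rw [he, if_pos (ha e (List.mem_cons_self))]
      have hre : dead ++ (e :: a') ++ b = (dead ++ [e]) ++ a' ++ b := by simp
      have hlen : dead.length + 1 = (dead ++ [e]).length := by simp
      rw [hre, hlen, ih (dead ++ [e]) b i (fun x hx => ha x (List.mem_cons_of_mem e hx)) hb hbne]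
      simp
      omega

lemma pvReach (f : Int → String) (r : Int) :
    ∀ (n : Nat) (x : Int), (r - 1 - x).toNat = n → x < r →
      ∃ z, x ≤ z ∧ z < r ∧ pvGood f r z = true ∧ f z ≤ f x := by
  intro n
  induction n using Nat.strong_induction_on with
  | _ n ih =>
      intro x hn hx
      by_cases hgood : pvGood f r x = true
      · exact ⟨x, le_refl x, hx, hgood, le_refl _⟩
      · have hex : ∃ y, x < y ∧ y < r ∧ ¬ f x < f y := by
          by_contra hcon
          push Not at hcon
          exact hgood ((pvGood_iff f r x).mpr (fun y h1 h2 => hcon y h1 h2))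
        obtain ⟨y, hy1, hy2, hy3⟩ := hex
        obtain ⟨z, hz1, hz2, hz3, hz4⟩ := ih (r - 1 - y).toNat (by omega) y rfl hy2
        exact ⟨z, by omega, hz2, hz3, le_trans hz4 (not_lt.mp hy3)⟩

lemma pvCanon_head_min (f : Int → String) (l r : Int) (h : l < r) :
    ∃ m t, pvCanon f l r = m :: t ∧ l ≤ m ∧ m < r ∧ ∀ x, l ≤ x → x < r → f m ≤ f x := by
  have hmem : r - 1 ∈ pvCanon f l r := by
    refine (mem_pvCanon f l r (r - 1)).mpr ⟨by omega, by omega, ?_⟩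
    intro y h1 h2; omega
  obtain ⟨m, t, hmt⟩ := List.exists_cons_of_ne_nil (List.ne_nil_of_mem hmem)
  have hm : m ∈ pvCanon f l r := by rw [hmt]; exact List.mem_cons_self
  obtain ⟨hml, hmr, hgood⟩ := (mem_pvCanon f l r m).mp hm
  refine ⟨m, t, hmt, hml, hmr, ?_⟩
  intro x hxl hxr
  obtain ⟨z, hz1, hz2, hz3, hz4⟩ := pvReach f r (r - 1 - x).toNat x rfl hxr
  have hzmem : z ∈ pvCanon f l r :=
    (mem_pvCanon f l r z).mpr ⟨by omega, hz2, (pvGood_iff f r z).mp hz3⟩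
  have hmz : m ≤ z := by
    rw [hmt] at hzmem
    rcases List.mem_cons.mp hzmem with rfl | hzt
    · exact le_refl z
    · have := pvCanon_pairwise_lt f l r
      rw [hmt] at this
      exact le_of_lt ((List.pairwise_cons.mp this).1 z hzt)
  rcases eq_or_lt_of_le hmz with rfl | hlt
  · exact hz4
  · exact le_trans (le_of_lt (hgood z hlt hz2)) hz4

-- ===== A-side lemmas =====

lemma pvSetfold {α : Type} (g : Nat → α) :
    ∀ (W : Nat) (xs : List α), W ≤ xs.length →
      (List.range W).foldl (fun l j => l.set j (g j)) xs = (List.range W).map g ++ xs.drop W := by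
  intro W
  induction W with
  | zero => simp
  | succ W ih =>
      intro xs hW
      rw [List.range_succ, List.foldl_append, ih xs (by omega)]
      simp only [List.foldl_cons, List.foldl_nil, List.map_append, List.map_cons, List.map_nil]
      have hWlen : W < xs.length := by omega
      have hdrop : xs.drop W = xs[W] :: xs.drop (W + 1) := List.drop_eq_getElem_cons hWlen
      rw [List.set_append_right _ _ (by simp)]
      simp only [List.length_map, List.length_range, Nat.sub_self]
      rw [hdrop, List.set_cons_zero]
      simp

lemma pvLkw (w : Int) {α : Type} (gI : Int → α) (d : α) :
    ((PySem.List.pyRange 0 w 1).foldl (fun l j => PySem.List.pySetD l j (gI j))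
      ((PySem.List.pyRange 0 w 1).map (fun _ => d)))
      = (PySem.List.pyRange 0 w 1).map gI := by
  rw [PySem.List.pyRange_zero, List.foldl_map]
  simp only [PySem.List.pySetD_natCast, List.map_map, Function.comp_def]
  have h := pvSetfold (fun j => gI (j : Int)) w.toNat
    ((List.range w.toNat).map (fun _ => d)) (by simp)
  rw [h]
  rw [List.drop_eq_nil_of_le (by simp), List.append_nil]

lemma pvInsertBy_congr {α : Type} (B1 B2 : α → α → Bool) (x : α) :
    ∀ ys : List α, (∀ y ∈ ys, B1 x y = B2 x y) →
      PySem.List.insertBy B1 x ys = PySem.List.insertBy B2 x ys := by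
  intro ys
  induction ys with
  | nil => intro _; rfl
  | cons y ys ih =>
      intro h
      show (if B1 x y then x :: y :: ys else y :: PySem.List.insertBy B1 x ys)
         = (if B2 x y then x :: y :: ys else y :: PySem.List.insertBy B2 x ys)
      rw [h y (List.mem_cons_self)]
      by_cases hb : B2 x y
      · simp [hb]
      · simp only [hb, if_neg, Bool.false_eq_true, not_false_iff]
        rw [ih (fun z hz => h z (List.mem_cons_of_mem y hz))]

lemma pvFoldCongr (B1 B2 : (String × Int) → (String × Int) → Bool) (i : Int)
    (hB : ∀ a b : String × Int, a.2 = i → b.2 = i → B1 a b = B2 a b) :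
    ∀ (xs acc : List (String × Int)), (∀ e ∈ xs, e.2 = i) → (∀ e ∈ acc, e.2 = i) →
      List.foldl (fun acc x => PySem.List.insertBy B1 x acc) acc xs
        = List.foldl (fun acc x => PySem.List.insertBy B2 x acc) acc xs := by
  intro xs
  induction xs with
  | nil => intro acc _ _; rfl
  | cons x xs ih =>
      intro acc hxs hacc
      simp only [List.foldl_cons]
      have hx : x.2 = i := hxs x (List.mem_cons_self)
      rw [pvInsertBy_congr B1 B2 x acc (fun y hy => hB x y hx (hacc y hy))]
      apply ih
      · exact fun e he => hxs e (List.mem_cons_of_mem x he)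
      · intro e he
        rcases (PySem.List.mem_insertBy B2 x e acc).mp he with rfl | h'
        · exact hx
        · exact hacc e h'

lemma pvSorted2_eq_sorted (xs : List (String × Int)) (i : Int) (h : ∀ e ∈ xs, e.2 = i) :
    PySem.List.sorted2 xs Prod.fst Prod.snd false = PySem.List.sorted xs Prod.fst false := by
  unfold PySem.List.sorted2 PySem.List.sorted
  simp only [if_neg (by decide : ¬ (false = true))]
  apply pvFoldCongr _ _ i _ xs [] h (by intro e he; cases he)
  intro a b ha hb
  simp [ha, hb]

lemma pvA_eq_entry (f : Int → String) (w i : Int) (hw : 0 < w) :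
    PySem.List.pyGetD
      (PySem.List.sorted2 ((PySem.List.pyRange 0 w 1).map (fun j => (f (i + j), i)))
        Prod.fst Prod.snd) 0 ("", 0)
      = (pvHead f i (i + w), i) := by
  set lkw := (PySem.List.pyRange 0 w 1).map (fun j => (f (i + j), i)) with hlkw
  have hsnd : ∀ e ∈ lkw, e.2 = i := by
    intro e he
    obtain ⟨j, _, rfl⟩ := List.mem_map.mp he
    rfl
  rw [pvSorted2_eq_sorted lkw i hsnd]
  have hne : lkw ≠ [] := by
    rw [hlkw]
    simp only [ne_eq, List.map_eq_nil_iff]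
    intro hc
    have := PySem.List.length_pyRange_one 0 w
    rw [hc] at this
    simp at this
    omega
  obtain ⟨m, t, hmt⟩ := List.exists_cons_of_ne_nil
    (fun hc => hne ((PySem.List.sorted_eq_nil_iff lkw Prod.fst false).mp hc))
  rw [hmt, PySem.List.pyGetD_zero_cons]
  have hmmem : m ∈ lkw :=
    (PySem.List.mem_sorted lkw Prod.fst false m).mp (hmt ▸ List.mem_cons_self)
  have hmin : ∀ y ∈ lkw, m.1 ≤ y.1 := PySem.List.key_head_sorted_le lkw Prod.fst hmt
  obtain ⟨j0, hj0mem, hj0⟩ := List.mem_map.mp hmmem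
  have hj0r : 0 ≤ j0 ∧ j0 < w := PySem.List.mem_pyRange_one.mp hj0mem
  obtain ⟨mh, th, hcanon, hmhl, hmhr, hmhmin⟩ := pvCanon_head_min f i (i + w) (by omega)
  have hhead : pvHead f i (i + w) = f mh := by unfold pvHead; rw [hcanon]
  have h1 : f mh ≤ m.1 := by
    rw [← hj0]
    exact hmhmin (i + j0) (by omega) (by omega)
  have h2 : m.1 ≤ f mh := by
    have hy : (f (i + (mh - i)), i) ∈ lkw := by
      rw [hlkw]
      exact List.mem_map.mpr ⟨mh - i, PySem.List.mem_pyRange_one.mpr ⟨by omega, by omega⟩, rfl⟩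
    have := hmin _ hy
    simpa [show i + (mh - i) = mh by omega] using this
  have hm2 : m.2 = i := by rw [← hj0]
  rw [hhead]
  exact Prod.ext (le_antisymm h2 h1) hm2

-- ===== B-side invariant =====

def pvStep (f : Int → String) (w : Int)
    (st : List (String × Int) × Nat × List (String × Int)) (p : Int) :
    List (String × Int) × Nat × List (String × Int) :=
  let s := f p
  let q := pvPopBack st.1 st.2.1 s ++ [(s, p)]
  let i := p - w + 1
  if 0 ≤ i then
    let head := pvAdvanceHead q st.2.1 i
    (q, head, st.2.2 ++ [((PySem.List.pyGetD q (head : Int) ("", 0)).1, i)])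
  else (q, st.2.1, st.2.2)

lemma pvB_inv (f : Int → String) (w : Int) (hw : 0 < w) :
    ∀ (P : Int), 0 ≤ P →
      ∃ dead : List (String × Int),
        (PySem.List.pyRange 0 P 1).foldl (pvStep f w) ([], 0, []) =
          (dead ++ (pvCanon f (max 0 (P - w)) P).map (pvEmb f),
           dead.length,
           (PySem.List.pyRange 0 (P - w + 1) 1).map (fun i => (pvHead f i (i + w), i))) := by
  intro P hP
  induction P, hP using Int.le_induction with
  | base =>
      refine ⟨[], ?_⟩
      rw [PySem.List.pyRange_one_eq_nil (le_refl 0)]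
      rw [PySem.List.pyRange_one_eq_nil (by omega : (0 : Int) - w + 1 ≤ 0)]
      unfold pvCanon
      rw [PySem.List.pyRange_one_eq_nil (by omega : (0 : Int) ≤ max 0 (0 - w))]
      simp
  | succ P hP ih =>
      obtain ⟨dead, hst⟩ := ih
      rw [PySem.List.pyRange_one_succ_right hP, List.foldl_append, hst]
      simp only [List.foldl_cons, List.foldl_nil]
      set l := max 0 (P - w) with hl
      have hlP : l ≤ P := by omega
      have hq : pvPopBack (dead ++ (pvCanon f l P).map (pvEmb f)) dead.length (f P) ++ [(f P, P)]
              = dead ++ (pvCanon f l (P + 1)).map (pvEmb f) := by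
        rw [pvPopBack_eq f (f P) _ dead (pvCanon_pairwise_str f l P)]
        rw [pvCanon_succ f l P hlP]
        simp [pvEmb]
      by_cases hi : 0 ≤ P - w + 1
      · -- an output index i = P - w + 1 is emitted
        set i := P - w + 1 with hidef
        obtain ⟨mh, th, hcanon, hmhl, hmhr, _⟩ := pvCanon_head_min f i (P + 1) (by omega)
        have hli : l ≤ i := by omega
        have hrestrict : pvCanon f i (P + 1) = (pvCanon f l (P + 1)).filter (fun x => decide (i ≤ x)) :=
          pvCanon_restrict f l i (P + 1) hli
        have hsplitc : pvCanon f l (P + 1)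
            = (pvCanon f l (P + 1)).filter (fun x => decide (x < i))
              ++ (pvCanon f l (P + 1)).filter (fun x => decide (i ≤ x)) :=
          pvSplit i _ (pvCanon_pairwise_lt f l (P + 1))
        set lo := (pvCanon f l (P + 1)).filter (fun x => decide (x < i)) with hlo
        have hsplit : pvCanon f l (P + 1) = lo ++ pvCanon f i (P + 1) := by
          rw [hrestrict]; exact hsplitc
        have hmapsplit : (pvCanon f l (P + 1)).map (pvEmb f)
            = lo.map (pvEmb f) ++ (pvCanon f i (P + 1)).map (pvEmb f) := by
          rw [hsplit, List.map_append]
        have hadv : pvAdvanceHead (dead ++ (pvCanon f l (P + 1)).map (pvEmb f)) dead.length i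
            = dead.length + (lo.map (pvEmb f)).length := by
          rw [hmapsplit, ← List.append_assoc]
          apply pvAdvanceHead_eq
          · intro e he
            obtain ⟨x, hx, rfl⟩ := List.mem_map.mp he
            rw [hlo] at hx
            have := of_decide_eq_true (List.mem_filter.mp hx).2
            simpa [pvEmb]
          · intro e he
            obtain ⟨x, hx, rfl⟩ := List.mem_map.mp he
            have := ((mem_pvCanon f i (P + 1) x).mp hx).1
            simp [pvEmb]; omega
          · rw [hcanon]; simp
        have hget : PySem.List.pyGetD (dead ++ (pvCanon f l (P + 1)).map (pvEmb f))
              ((dead.length + (lo.map (pvEmb f)).length : Nat) : Int) ("", 0)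
            = pvEmb f mh := by
          rw [PySem.List.pyGetD_natCast]
          rw [hmapsplit, ← List.append_assoc]
          rw [List.getD_eq_getElem?_getD]
          rw [List.getElem?_append_right (by simp)]
          simp [hcanon]
        have hmax : max 0 (P + 1 - w) = i := by omega
        have hout : PySem.List.pyRange 0 (P + 1 - w + 1) 1
            = PySem.List.pyRange 0 (P - w + 1) 1 ++ [i] := by
          rw [show P + 1 - w + 1 = (P - w + 1) + 1 by ring]
          exact PySem.List.pyRange_one_succ_right hi
        have hheadv : pvHead f i (i + w) = f mh := by
          unfold pvHead
          rw [show i + w = P + 1 by omega, hcanon]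
        refine ⟨dead ++ lo.map (pvEmb f), ?_⟩
        unfold pvStep
        simp only [hq]
        rw [hadv, hget, if_pos hi]
        refine Prod.ext ?_ (Prod.ext ?_ ?_)
        · simp only [hmax]
          rw [hmapsplit, ← List.append_assoc]
        · simp
        · simp only [hout, List.map_append, List.map_cons, List.map_nil]
          simp only [hheadv, pvEmb]
          rfl
      · -- no output yet (the window is not full)
        refine ⟨dead, ?_⟩
        unfold pvStep
        simp only [hq, if_neg hi]
        have hmax : max 0 (P + 1 - w) = l := by omega
        have h1 : PySem.List.pyRange 0 (P + 1 - w + 1) 1 = ([] : List Int) :=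
          PySem.List.pyRange_one_eq_nil (by omega)
        have h2 : PySem.List.pyRange 0 (P - w + 1) 1 = ([] : List Int) :=
          PySem.List.pyRange_one_eq_nil (by omega)
        rw [hmax, h1, h2]

-- ===== assembling the two sides =====

def pvAEntry (seq : String) (w k : Int) (i : Int) : String × Int :=
  PySem.List.pyGetD
    (PySem.List.sorted2
      ((PySem.List.pyRange 0 w 1).foldl
        (fun lkw j => PySem.List.pySetD lkw j
          (PySem.Str.slice seq (some (i + j)) (some (i + j + k)), i))
        ((PySem.List.pyRange 0 w 1).map (fun _ => ("", 0))))
      Prod.fst Prod.snd) 0 ("", 0)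

lemma pvFoldMap {α β : Type} (F : List β → α → List β) (g : α → β)
    (hF : ∀ acc x, F acc x = acc ++ [g x]) :
    ∀ (l : List α) (acc : List β), l.foldl F acc = acc ++ l.map g := by
  intro l
  induction l with
  | nil => simp
  | cons x t ih =>
      intro acc
      rw [List.foldl_cons, hF, ih, List.map_cons]
      simp

lemma pvA_map (seq : String) (w k : Int) :
    minimap seq w k
      = (PySem.List.pyRange 0 (PySem.Str.len seq - k - 1) 1).map (pvAEntry seq w k) := by
  unfold minimap
  refine (pvFoldMap _ (pvAEntry seq w k) ?_ _ _).trans (by simp)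
  intro acc i
  simp [pvAEntry]

-- ===== VERDICT (by name: the statement is the Claim_ definition above) =====
theorem minimap_spec : Claim_equal_minimap := by
  unfold Claim_equal_minimap Spec_minimap
  intro seq w k _ hpre
  by_cases hn0 : PySem.Str.len seq - k - 1 ≤ 0
  · unfold minimap_alt
    simp only [if_pos (Or.inl hn0)]
    rw [pvA_map, PySem.List.pyRange_one_eq_nil hn0]
    rfl
  · have hw : 0 < w := by
      rcases hpre with h | h
      · exact h
      · omega
    set f : Int → String := fun p => PySem.Str.slice seq (some p) (some (p + k)) with hf
    set n : Int := PySem.Str.len seq - k - 1 with hn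
    -- A side
    rw [pvA_map]
    have hAentry : ∀ i ∈ PySem.List.pyRange 0 n 1,
        pvAEntry seq w k i = (pvHead f i (i + w), i) := by
      intro i _
      unfold pvAEntry
      have hfold := pvLkw w (fun j => ((f (i + j), i) : String × Int)) ("", 0)
      have heq : (fun (lkw : List (String × Int)) (j : Int) => PySem.List.pySetD lkw j
            (PySem.Str.slice seq (some (i + j)) (some (i + j + k)), i))
          = (fun lkw j => PySem.List.pySetD lkw j (f (i + j), i)) := by
        funext lkw j
        simp only [hf]
      rw [heq, hfold]
      exact pvA_eq_entry f w i hw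
    rw [List.map_congr_left hAentry]
    -- B side
    unfold minimap_alt
    rw [if_neg (by rintro (h | h) <;> omega)]
    have hB : ((PySem.List.pyRange 0 (n + w - 1) 1).foldl
        (fun (st : List (String × Int) × Nat × List (String × Int)) p =>
          let s := PySem.Str.slice seq (some p) (some (p + k))
          let q := pvPopBack st.1 st.2.1 s ++ [(s, p)]
          let i := p - w + 1
          if 0 ≤ i then
            let head := pvAdvanceHead q st.2.1 i
            (q, head, st.2.2 ++ [((PySem.List.pyGetD q (head : Int) ("", 0)).1, i)])
          else (q, st.2.1, st.2.2))
        ([], 0, []))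
        = (PySem.List.pyRange 0 (n + w - 1) 1).foldl (pvStep f w) ([], 0, []) := by
      rfl
    rw [hB]
    obtain ⟨dead, hstate⟩ := pvB_inv f w hw (n + w - 1) (by omega)
    rw [hstate]
    simp only []
    rw [show n + w - 1 - w + 1 = n by ring]
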